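-- pv_equiv track=rewrite | github.com/ssolllll/Coding_test_practice | Programmers_Lv.0/저주의 숫자 3.py | solution
-- ===== SOURCE A (Python) =====
-- def solution(n):
--     answer = 0
--     value = 1
--     while True:
--         answer = 0
--         for v in range(value,n+1):
--             if v%3 == 0 or '3' in str(v):
--                 answer += 1
--         value = n+1
--         n += answer
--         if answer == 0 and n %3 != 0:
--             break
--     return n
-- ===== SOURCE B (Python) =====
-- def solution(n):
--     x = 0
--     for _ in range(n):
--         x += 1
--         while x % 3 == 0 or '3' in str(x):
--             x += 1
--     return x
-- ===== Notes on version B (the rewrite author's own statement) =====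
-- stated objective: alternative
-- what changed: A repeatedly bulk-counts cursed numbers in growing segments and shifts n by that count until a fixed point; B directly walks the good (non-multiple-of-3, no digit '3') numbers one by one, taking the n-th.
-- outside the precondition, e.g. on solution(-1): A returns -1, B returns 0; on solution(-2): A returns -2, B returns 0; on solution(0): A does not finish within the time limit, B returns 0
import Mathlib
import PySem

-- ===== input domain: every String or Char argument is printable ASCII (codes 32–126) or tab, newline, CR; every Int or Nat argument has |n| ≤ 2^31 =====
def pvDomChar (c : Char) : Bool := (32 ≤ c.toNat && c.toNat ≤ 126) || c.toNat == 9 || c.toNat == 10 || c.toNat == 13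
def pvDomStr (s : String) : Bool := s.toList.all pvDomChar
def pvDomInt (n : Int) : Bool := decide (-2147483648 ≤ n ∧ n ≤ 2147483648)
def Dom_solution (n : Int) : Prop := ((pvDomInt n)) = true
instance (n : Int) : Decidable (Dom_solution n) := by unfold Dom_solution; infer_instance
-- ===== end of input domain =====

-- B walks the good numbers one by one instead of A's segment-recount fixed-point loop; same cost, plainer structure (return value only).

-- ===== PORT A =====
-- the "cursed" test  v%3 == 0 or '3' in str(v)  shared verbatim by both Pythons
def pvCursed (v : Int) : Bool :=
  PySem.Int.mod v 3 == 0 || PySem.Str.isIn "3" (PySem.Int.toStr v)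

-- while True: recount cursed in [value, n], shift n, until answer==0 and n%3!=0.
-- fuel is only a totality device (Python diverges for n ≤ 0 with n%3==0, outside Pre_);
-- fuel 10^n.toNat + 2 is proved sufficient for every n admitted by Pre_.
def solutionLoop : Nat → Int → Int → Int
  | 0, _, n => n
  | fuel+1, value, n =>
    let answer : Int :=
      (PySem.List.pyRange value (n+1) 1).foldl (fun a v => if pvCursed v then a + 1 else a) 0
    if answer = 0 ∧ PySem.Int.mod (n + answer) 3 ≠ 0 then n + answer
    else solutionLoop fuel (n+1) (n + answer)

def solution (n : Int) : Int := solutionLoop (10 ^ n.toNat + 2) 1 n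

-- ===== PORT B =====
-- while x % 3 == 0 or '3' in str(x): x += 1   — fuel is a totality device,
-- sufficient because 10^(x.natAbs) is a good number ≥ x (proved below).
def pvSkip : Nat → Int → Int
  | 0, x => x
  | fuel+1, x => if pvCursed x then pvSkip fuel (x+1) else x

def solution_alt (n : Int) : Int :=
  (PySem.List.pyRange 0 n 1).foldl (fun x _ => pvSkip (10 ^ (x + 1).natAbs + 1) (x + 1)) 0

-- ===== PRECONDITION & SPEC =====
-- Pre_ excludes n < 1, outside the problem's domain: there A's loop body never runs, so A
-- diverges whenever n % 3 == 0 and otherwise returns n unchanged, while B naturally returns 0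
-- — a corner no specification covers.
def Pre_solution (n : Int) : Prop := 1 ≤ n
instance (n : Int) : Decidable (Pre_solution n) := by unfold Pre_solution; infer_instance
def pvWitness_solution : Int := 5

def Spec_solution (n : Int) (out : Int) : Prop := out = solution_alt n
instance (n : Int) (out : Int) : Decidable (Spec_solution n out) := by unfold Spec_solution; infer_instance

-- ===== CLAIM (what is proved, stated in full; the proofs are below) =====
def Claim_equal_solution : Prop := ∀ (n : Int), Dom_solution n → Pre_solution n → Spec_solution n (solution n)

-- ===== LEMMAS AND PROOFS =====

-- number of cursed values in [1, m)
def pvCcnt (m : Int) : Nat := (PySem.List.pyRange 1 m 1).countP pvCursed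

lemma pvCcnt_one : pvCcnt 1 = 0 := by
  simp [pvCcnt, PySem.List.pyRange_one_eq_nil le_rfl]

lemma pvCcnt_split {a b : Int} (h1 : 1 ≤ a) (h2 : a ≤ b) :
    pvCcnt b = pvCcnt a + (PySem.List.pyRange a b 1).countP pvCursed := by
  unfold pvCcnt
  rw [PySem.List.pyRange_one_append 1 a b h1 h2, List.countP_append]

lemma pvGood_mod {x : Int} (h : pvCursed x = false) : PySem.Int.mod x 3 ≠ 0 := by
  unfold pvCursed at h
  simp only [Bool.or_eq_false_iff, beq_eq_false_iff_ne] at h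
  exact h.1

lemma pvToDigitsCore_pow10 : ∀ (k fuel : Nat) (acc : List Char), k < fuel →
    Nat.toDigitsCore 10 fuel (10 ^ k) acc = '1' :: (List.replicate k '0' ++ acc) := by
  intro k
  induction k with
  | zero =>
    intro fuel acc h
    match fuel, h with
    | f + 1, _ =>
      simp only [Nat.toDigitsCore]
      norm_num
      decide
  | succ k ih =>
    intro fuel acc h
    match fuel, h with
    | f + 1, h =>
      have hmod : 10 ^ (k + 1) % 10 = 0 := by
        simp [pow_succ]
      have hdiv : 10 ^ (k + 1) / 10 = 10 ^ k := by
        rw [pow_succ]; exact Nat.mul_div_cancel _ (by norm_num)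
      simp only [Nat.toDigitsCore, hmod, hdiv]
      rw [if_neg (pow_ne_zero k (by norm_num : (10 : Nat) ≠ 0))]
      rw [(by decide : Nat.digitChar 0 = '0'), ih f ('0' :: acc) (by omega)]
      simp [List.replicate_succ']

lemma pvPow10_good (k : Nat) : pvCursed ((10 : Int) ^ k) = false := by
  have hmod : PySem.Int.mod ((10 : Int) ^ k) 3 = 1 := by
    rw [PySem.Int.mod_eq_emod_of_pos (by norm_num)]
    induction k with
    | zero => decide
    | succ k ih => rw [pow_succ, Int.mul_emod, ih]; decide
  have hchars : PySem.Int.toChars ((10 : Int) ^ k) = '1' :: List.replicate k '0' := by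
    have hnn : ¬ ((10 : Int) ^ k < 0) := not_lt.mpr (by positivity)
    have htn : ((10 : Int) ^ k).toNat = 10 ^ k := by
      have : ((10 : Int) ^ k) = ((10 ^ k : Nat) : Int) := by push_cast; ring
      rw [this, Int.toNat_natCast]
    simp only [PySem.Int.toChars, if_neg hnn, htn, Nat.toDigits]
    rw [pvToDigitsCore_pow10 k (10 ^ k + 1) [] (by have := Nat.lt_pow_self (a := 10) (n := k) (by norm_num); omega)]
    simp
  unfold pvCursed
  simp only [Bool.or_eq_false_iff, beq_eq_false_iff_ne]
  refine ⟨by rw [hmod]; norm_num, ?_⟩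
  rw [← Bool.not_eq_true, PySem.Str.isIn_iff_infix, PySem.Int.toList_toStr, hchars]
  intro hinf
  have h3 : '3' ∈ '1' :: List.replicate k '0' := hinf.subset (by simp)
  simp only [List.mem_cons, List.mem_replicate] at h3
  rcases h3 with h | ⟨_, h⟩ <;> exact absurd h (by decide)

lemma pvSkip_spec : ∀ (fuel : Nat) (s g : Int), s ≤ g → pvCursed g = false → (g - s).toNat < fuel →
    pvCursed (pvSkip fuel s) = false ∧ s ≤ pvSkip fuel s ∧
      ∀ v, s ≤ v → v < pvSkip fuel s → pvCursed v = true := by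
  intro fuel
  induction fuel with
  | zero => intro s g h1 h2 h3; omega
  | succ f ih =>
    intro s g h1 h2 h3
    by_cases hcs : pvCursed s = true
    · have hsg : s ≠ g := by intro e; rw [e, h2] at hcs; cases hcs
      obtain ⟨ha, hb, hc⟩ := ih (s+1) g (by omega) h2 (by omega)
      simp only [pvSkip, hcs, if_true]
      refine ⟨ha, by omega, ?_⟩
      intro v hv1 hv2
      by_cases hv : v = s
      · rw [hv]; exact hcs
      · exact hc v (by omega) hv2
    · simp only [Bool.not_eq_true] at hcs
      have hstep : pvSkip (f+1) s = s := by simp [pvSkip, hcs]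
      rw [hstep]
      exact ⟨hcs, le_refl _, fun v hv1 hv2 => absurd hv2 (by omega)⟩

-- one outer iteration of B: from a state x carrying the invariant, the next state is the next good number
lemma pvStep_spec (x j : Int) (hx : 0 ≤ x) (hinv : x = j + (pvCcnt (x+1) : Int)) :
    1 ≤ pvSkip (10 ^ (x + 1).natAbs + 1) (x + 1) ∧
    pvCursed (pvSkip (10 ^ (x + 1).natAbs + 1) (x + 1)) = false ∧
    pvSkip (10 ^ (x + 1).natAbs + 1) (x + 1) = (j + 1) + (pvCcnt (pvSkip (10 ^ (x + 1).natAbs + 1) (x + 1) + 1) : Int) := by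
  set s : Int := x + 1 with hs
  have hs1 : 1 ≤ s := by omega
  have hcast : ((10 ^ s.natAbs : Nat) : Int) = (10 : Int) ^ s.natAbs := by push_cast; ring
  have habs : (s.natAbs : Int) = s := Int.natAbs_of_nonneg (by omega)
  have hlt : s.natAbs < 10 ^ s.natAbs := Nat.lt_pow_self (by norm_num)
  have hsg : s ≤ (10 : Int) ^ s.natAbs := by omega
  have hfuel : ((10 : Int) ^ s.natAbs - s).toNat < 10 ^ s.natAbs + 1 := by omega
  obtain ⟨hgood, hle, hall⟩ := pvSkip_spec (10 ^ s.natAbs + 1) s ((10 : Int) ^ s.natAbs) hsg (pvPow10_good _) hfuel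
  set y : Int := pvSkip (10 ^ s.natAbs + 1) s with hy
  have hy1 : 1 ≤ y := by omega
  have hsplit : pvCcnt (y+1) = pvCcnt s + (PySem.List.pyRange s (y+1) 1).countP pvCursed :=
    pvCcnt_split hs1 (by omega)
  have hrng : PySem.List.pyRange s (y+1) 1 = PySem.List.pyRange s y 1 ++ [y] :=
    PySem.List.pyRange_one_succ_right hle
  have hcall : (PySem.List.pyRange s y 1).countP pvCursed = (PySem.List.pyRange s y 1).length := by
    apply List.countP_eq_length.mpr
    intro v hv
    rw [PySem.List.mem_pyRange_one] at hv
    exact hall v hv.1 hv.2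
  have hlen : (PySem.List.pyRange s y 1).length = (y - s).toNat := PySem.List.length_pyRange_one s y
  have hcy : (PySem.List.pyRange s (y+1) 1).countP pvCursed = (y - s).toNat := by
    rw [hrng, List.countP_append, hcall, hlen]
    simp [hgood]
  refine ⟨hy1, hgood, ?_⟩
  rw [hsplit, hcy]
  omega

lemma pvAlt_fold (k : Nat) :
    0 ≤ ((PySem.List.pyRange 0 (k : Int) 1).foldl (fun x _ => pvSkip (10 ^ (x + 1).natAbs + 1) (x + 1)) 0 : Int) ∧
    ((PySem.List.pyRange 0 (k : Int) 1).foldl (fun x _ => pvSkip (10 ^ (x + 1).natAbs + 1) (x + 1)) 0 : Int)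
      = (k : Int) + (pvCcnt (((PySem.List.pyRange 0 (k : Int) 1).foldl (fun x _ => pvSkip (10 ^ (x + 1).natAbs + 1) (x + 1)) 0 : Int) + 1) : Int) ∧
    (k = 0 ∨ pvCursed ((PySem.List.pyRange 0 (k : Int) 1).foldl (fun x _ => pvSkip (10 ^ (x + 1).natAbs + 1) (x + 1)) 0) = false) := by
  induction k with
  | zero =>
    have h0 : ((0 : Nat) : Int) = 0 := by norm_num
    rw [h0, PySem.List.pyRange_one_eq_nil le_rfl]
    simp [pvCcnt_one]
  | succ k ih =>
    obtain ⟨h0, hinv, _⟩ := ih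
    have hcast : ((k + 1 : Nat) : Int) = (k : Int) + 1 := by push_cast; ring
    rw [hcast, PySem.List.pyRange_one_succ_right (by positivity), List.foldl_append]
    set x : Int := (PySem.List.pyRange 0 (k : Int) 1).foldl (fun x _ => pvSkip (10 ^ (x + 1).natAbs + 1) (x + 1)) 0 with hx
    obtain ⟨h1, h2, h3⟩ := pvStep_spec x (k : Int) h0 hinv
    simp only [List.foldl_cons, List.foldl_nil]
    exact ⟨by omega, by omega, Or.inr h2⟩

lemma pvAlt_props (n : Int) (hn : 1 ≤ n) :
    1 ≤ solution_alt n ∧ pvCursed (solution_alt n) = false ∧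
      solution_alt n = n + (pvCcnt (solution_alt n + 1) : Int) := by
  have hk : ((n.toNat : Nat) : Int) = n := Int.toNat_of_nonneg (by omega)
  obtain ⟨h0, hinv, hg⟩ := pvAlt_fold n.toNat
  rw [hk] at h0 hinv hg
  have hne : n.toNat ≠ 0 := by omega
  unfold solution_alt
  rcases hg with h | h
  · exact absurd h hne
  · refine ⟨?_, h, hinv⟩
    omega

lemma pvUnique_aux {x y n0 : Int} (hx1 : 1 ≤ x) (hxy : x < y) (hgy : pvCursed y = false)
    (hex : x = n0 + (pvCcnt (x+1) : Int)) (hey : y = n0 + (pvCcnt (y+1) : Int)) : False := by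
  have hsplit : pvCcnt (y+1) = pvCcnt (x+1) + (PySem.List.pyRange (x+1) (y+1) 1).countP pvCursed :=
    pvCcnt_split (by omega) (by omega)
  have hlen : (PySem.List.pyRange (x+1) (y+1) 1).length = ((y+1) - (x+1)).toNat :=
    PySem.List.length_pyRange_one _ _
  have hle : (PySem.List.pyRange (x+1) (y+1) 1).countP pvCursed ≤ (PySem.List.pyRange (x+1) (y+1) 1).length :=
    List.countP_le_length
  have heq : (PySem.List.pyRange (x+1) (y+1) 1).countP pvCursed = (PySem.List.pyRange (x+1) (y+1) 1).length := by
    omega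
  have hall := List.countP_eq_length.mp heq y (by rw [PySem.List.mem_pyRange_one]; omega)
  rw [hgy] at hall
  cases hall

lemma pvUnique {x y n0 : Int} (hx1 : 1 ≤ x) (hy1 : 1 ≤ y) (hgx : pvCursed x = false)
    (hgy : pvCursed y = false) (hex : x = n0 + (pvCcnt (x+1) : Int))
    (hey : y = n0 + (pvCcnt (y+1) : Int)) : x = y := by
  rcases lt_trichotomy x y with h | h | h
  · exact absurd (pvUnique_aux hx1 h hgy hex hey) (fun f => f)
  · exact h
  · exact absurd (pvUnique_aux hy1 h hgx hey hex) (fun f => f)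

lemma pvLoop_spec (n0 t : Int) (ht1 : 1 ≤ t) (hgt : pvCursed t = false)
    (hteq : t = n0 + (pvCcnt (t+1) : Int)) :
    ∀ (fuel : Nat) (value n : Int), 1 ≤ value → value ≤ n → n = n0 + (pvCcnt value : Int) →
      n ≤ t → (t - n).toNat < fuel → solutionLoop fuel value n = t := by
  intro fuel
  induction fuel with
  | zero => intro value n _ _ _ _ h5; omega
  | succ f ih =>
    intro value n h1 h2 h3 h4 h5
    have hfold : ((PySem.List.pyRange value (n+1) 1).foldl (fun a v => if pvCursed v then a + 1 else a) (0 : Int))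
        = ((PySem.List.pyRange value (n+1) 1).countP pvCursed : Int) := by
      rw [PySem.List.foldl_count_if pvCursed _ 0]; ring
    set c : Nat := (PySem.List.pyRange value (n+1) 1).countP pvCursed with hc
    have hsplit : pvCcnt (n+1) = pvCcnt value + c := pvCcnt_split h1 (by omega)
    simp only [solutionLoop, hfold]
    by_cases hc0 : c = 0
    · have hgn : pvCursed n = false := by
        have := List.countP_eq_zero.mp (by rw [← hc, hc0]) n
          (by rw [PySem.List.mem_pyRange_one]; omega)
        simpa using this
      have hcond : ((c : Int) = 0 ∧ PySem.Int.mod (n + (c : Int)) 3 ≠ 0) := by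
        refine ⟨by omega, ?_⟩
        have : n + (c : Int) = n := by omega
        rw [this]
        exact pvGood_mod hgn
      rw [if_pos hcond]
      have hn_eq : n = n0 + (pvCcnt (n+1) : Int) := by omega
      have := pvUnique (n0 := n0) (by omega : 1 ≤ n) ht1 hgn hgt hn_eq hteq
      omega
    · have hcond : ¬ ((c : Int) = 0 ∧ PySem.Int.mod (n + (c : Int)) 3 ≠ 0) := by
        intro h; exact hc0 (by exact_mod_cast h.1)
      rw [if_neg hcond]
      have hmono : pvCcnt (n+1) ≤ pvCcnt (t+1) := by
        rcases eq_or_lt_of_le h4 with rfl | hlt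
        · omega
        · have := pvCcnt_split (a := n+1) (b := t+1) (by omega) (by omega)
          omega
      exact ih (n+1) (n + (c : Int)) (by omega) (by omega) (by rw [hsplit] at *; push_cast; omega)
        (by omega) (by omega)

lemma pvPow10_count : ∀ j : Nat, (j : Int) + 1 ≤ (10 : Int) ^ j - (pvCcnt ((10 : Int) ^ j + 1) : Int) := by
  intro j
  induction j with
  | zero =>
    have h2 : pvCcnt (1 + 1) = 0 := by
      have h1 : pvCursed 1 = false := by decide
      unfold pvCcnt
      rw [PySem.List.pyRange_one_singleton]
      simp [h1]
    rw [pow_zero, h2]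
    norm_num
  | succ j ih =>
    set M : Int := (10 : Int) ^ j with hM
    have hM1 : 1 ≤ M := one_le_pow₀ (by norm_num)
    have hMM : M < (10 : Int) ^ (j + 1) := by
      rw [pow_succ, ← hM]; nlinarith
    have hsplit : pvCcnt ((10 : Int) ^ (j+1) + 1)
        = pvCcnt (M + 1) + (PySem.List.pyRange (M+1) ((10 : Int) ^ (j+1) + 1) 1).countP pvCursed :=
      pvCcnt_split (by omega) (by omega)
    have hlen : (PySem.List.pyRange (M+1) ((10 : Int) ^ (j+1) + 1) 1).length
        = (((10 : Int) ^ (j+1) + 1) - (M+1)).toNat := PySem.List.length_pyRange_one _ _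
    have hle : (PySem.List.pyRange (M+1) ((10 : Int) ^ (j+1) + 1) 1).countP pvCursed
        ≤ (PySem.List.pyRange (M+1) ((10 : Int) ^ (j+1) + 1) 1).length := List.countP_le_length
    have hne : (PySem.List.pyRange (M+1) ((10 : Int) ^ (j+1) + 1) 1).countP pvCursed
        ≠ (PySem.List.pyRange (M+1) ((10 : Int) ^ (j+1) + 1) 1).length := by
      intro h
      have hall := List.countP_eq_length.mp h ((10 : Int) ^ (j+1))
        (by rw [PySem.List.mem_pyRange_one]; omega)
      rw [pvPow10_good (j+1)] at hall
      cases hall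
    have hcast : ((j + 1 : Nat) : Int) = (j : Int) + 1 := by push_cast; ring
    rw [hcast, hsplit]
    omega

-- ===== VERDICT (by name: the statement is the Claim_ definition above) =====
theorem solution_spec : Claim_equal_solution := by
  unfold Claim_equal_solution
  intro n _ hpre
  unfold Pre_solution at hpre
  unfold Spec_solution
  obtain ⟨ht1, hgt, hteq⟩ := pvAlt_props n hpre
  set t : Int := solution_alt n with ht
  set K : Nat := n.toNat with hK
  have hKn : ((K : Nat) : Int) = n := Int.toNat_of_nonneg (by omega)
  have hpow := pvPow10_count K
  have hcast : ((10 ^ K : Nat) : Int) = (10 : Int) ^ K := by push_cast; ring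
  have htM : t ≤ (10 : Int) ^ K := by
    by_contra hcon
    push_neg at hcon
    set M : Int := (10 : Int) ^ K with hMdef
    have hM1 : 1 ≤ M := one_le_pow₀ (by norm_num)
    have hsplit : pvCcnt (t+1) = pvCcnt (M+1) + (PySem.List.pyRange (M+1) (t+1) 1).countP pvCursed :=
      pvCcnt_split (by omega) (by omega)
    have hlen : (PySem.List.pyRange (M+1) (t+1) 1).length = ((t+1) - (M+1)).toNat :=
      PySem.List.length_pyRange_one _ _
    have hle : (PySem.List.pyRange (M+1) (t+1) 1).countP pvCursed
        ≤ (PySem.List.pyRange (M+1) (t+1) 1).length := List.countP_le_length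
    omega
  have hfuel : (t - n).toNat < 10 ^ K + 2 := by omega
  unfold solution
  rw [← hK]
  exact pvLoop_spec n t ht1 hgt hteq (10 ^ K + 2) 1 n le_rfl hpre
    (by rw [pvCcnt_one]; omega) (by omega) hfuel
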